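-- pv_equiv track=rewrite | github.com/MarlonCorreia/aoc-2021 | 08/08.py | part1
-- ===== SOURCE A (Python) =====
-- def part1(m, digits):
--     digits = [y for x in digits for y in x]
--     r = [0 for _ in range(0, 10)]
--
--     for d in digits:
--         d = len(d)
--         for idx, x in enumerate(m):
--             if len(x) == d:
--                 r[idx] += 1
--
--     return r[1] + r[4] + r[7] + r[8]
-- ===== SOURCE B (Python) =====
-- def part1(m, digits):
--     counts = {}
--     for x in digits:
--         for y in x:
--             counts[len(y)] = counts.get(len(y), 0) + 1
--     total = 0
--     for idx, x in enumerate(m):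
--         if idx in (1, 4, 7, 8):
--             total += counts.get(len(x), 0)
--     return total
-- ===== Notes on version B (the rewrite author's own statement) =====
-- stated objective: simpler
-- what changed: B builds a frequency table of output-digit lengths in one pass and then makes a single pass over the patterns summing the counts at indices 1/4/7/8, replacing A's nested per-digit scan of m and its 10-slot counter array.
import Mathlib
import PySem

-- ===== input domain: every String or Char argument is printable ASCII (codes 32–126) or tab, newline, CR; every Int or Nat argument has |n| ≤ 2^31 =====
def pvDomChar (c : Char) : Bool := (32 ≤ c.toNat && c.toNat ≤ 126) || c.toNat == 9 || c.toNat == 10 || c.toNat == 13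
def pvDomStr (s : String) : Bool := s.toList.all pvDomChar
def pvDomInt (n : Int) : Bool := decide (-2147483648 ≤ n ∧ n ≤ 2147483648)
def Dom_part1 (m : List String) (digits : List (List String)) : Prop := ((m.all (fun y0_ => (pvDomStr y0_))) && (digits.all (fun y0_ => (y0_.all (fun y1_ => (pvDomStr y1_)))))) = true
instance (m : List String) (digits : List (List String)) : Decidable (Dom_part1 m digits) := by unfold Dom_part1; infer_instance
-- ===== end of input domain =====

-- B replaces A's nested digit-by-pattern scan with a one-pass frequency table of digit
-- lengths followed by a single lookup pass over the patterns (objective: simpler).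

-- ===== PORT A =====
-- 'for idx, x in enumerate(m): if len(x) == d: r[idx] += 1'  (idx is the enumerate counter)
def part1Inner (d : Int) (idx : Nat) (xs : List String) (r : List Int) : List Int :=
  match xs with
  | [] => r
  | x :: rest =>
      part1Inner d (idx + 1) rest
        (if PySem.Str.len x = d then r.set idx (r.getD idx 0 + 1) else r)

-- 'for d in digits: d = len(d); <inner loop>'
def part1Outer (m : List String) (ds : List String) (r : List Int) : List Int :=
  match ds with
  | [] => r
  | dstr :: rest => part1Outer m rest (part1Inner (PySem.Str.len dstr) 0 m r)

def part1 (m : List String) (digits : List (List String)) : Int :=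
  let ds := digits.flatten                                   -- [y for x in digits for y in x]
  let r0 : List Int := (PySem.List.pyRange 0 10 1).map (fun _ => 0)   -- [0 for _ in range(0, 10)]
  let r := part1Outer m ds r0
  r.getD 1 0 + r.getD 4 0 + r.getD 7 0 + r.getD 8 0

-- ===== PORT B =====
-- 'for y in x: counts[len(y)] = counts.get(len(y), 0) + 1'
def countLens (ys : List String) (c : PySem.Dict Int Int) : PySem.Dict Int Int :=
  match ys with
  | [] => c
  | y :: rest => countLens rest (c.insert (PySem.Str.len y) (c.getD (PySem.Str.len y) 0 + 1))

-- 'for x in digits: <inner loop>'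
def countAll (digits : List (List String)) (c : PySem.Dict Int Int) : PySem.Dict Int Int :=
  match digits with
  | [] => c
  | x :: rest => countAll rest (countLens x c)

-- 'for idx, x in enumerate(m): if idx in (1,4,7,8): total += counts.get(len(x), 0)'
def sumSel (c : PySem.Dict Int Int) (idx : Nat) (xs : List String) : Int :=
  match xs with
  | [] => 0
  | x :: rest =>
      (if idx = 1 ∨ idx = 4 ∨ idx = 7 ∨ idx = 8 then c.getD (PySem.Str.len x) 0 else 0)
        + sumSel c (idx + 1) rest

def part1_alt (m : List String) (digits : List (List String)) : Int :=
  sumSel (countAll digits PySem.Dict.empty) 0 m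

-- ===== PRECONDITION & SPEC =====
-- Pre_ excludes exactly the inputs on which Python A raises IndexError: m has more than 10
-- patterns and some flattened digit's length matches a pattern at index ≥ 10 (r[idx] with idx ≥ 10).
def Pre_part1 (m : List String) (digits : List (List String)) : Prop :=
  ∀ x ∈ m.drop 10, ∀ y ∈ digits.flatten, PySem.Str.len y ≠ PySem.Str.len x
instance (m : List String) (digits : List (List String)) : Decidable (Pre_part1 m digits) := by
  unfold Pre_part1; infer_instance

def pvWitness_part1 : List String × List (List String) := (["ab", "c"], [["de", "f"], ["gh"]])

def Spec_part1 (m : List String) (digits : List (List String)) (out : Int) : Prop := out = part1_alt m digits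
instance (m : List String) (digits : List (List String)) (out : Int) : Decidable (Spec_part1 m digits out) := by unfold Spec_part1; infer_instance

-- ===== CLAIM (what is proved, stated in full; the proofs are below) =====
def Claim_equal_part1 : Prop := ∀ (m : List String) (digits : List (List String)), Dom_part1 m digits → Pre_part1 m digits → Spec_part1 m digits (part1 m digits)


-- ===== LEMMAS AND PROOFS =====

-- number of matches of pattern index j among m (starting at enumerate counter k) for digit length d
def indCount (k : Nat) (xs : List String) (j : Nat) (d : Int) : Int :=
  match xs with
  | [] => 0
  | x :: rest => (if k = j ∧ PySem.Str.len x = d then 1 else 0) + indCount (k + 1) rest j d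

theorem getD_set_self (r : List Int) (k : Nat) (v : Int) (h : k < r.length) :
    (r.set k v).getD k 0 = v := by
  simp [List.getD, h]

theorem getD_set_ne (r : List Int) (k j : Nat) (v : Int) (h : k ≠ j) :
    (r.set k v).getD j 0 = r.getD j 0 := by
  simp [List.getD, List.getElem?_set_ne h]

theorem length_part1Inner (d : Int) (idx : Nat) (xs : List String) (r : List Int) :
    (part1Inner d idx xs r).length = r.length := by
  induction xs generalizing idx r with
  | nil => rfl
  | cons x rest ih =>
      simp only [part1Inner]
      rw [ih]
      split <;> simp

theorem getD_part1Inner (d : Int) (k : Nat) (xs : List String) (r : List Int) (j : Nat)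
    (hj : j < r.length) :
    (part1Inner d k xs r).getD j 0 = r.getD j 0 + indCount k xs j d := by
  induction xs generalizing k r with
  | nil => simp [part1Inner, indCount]
  | cons x rest ih =>
      simp only [part1Inner, indCount]
      by_cases hx : PySem.Str.len x = d
      · rw [if_pos hx, ih _ _ (by simpa using hj)]
        by_cases hk : k = j
        · subst hk
          rw [getD_set_self _ _ _ hj, if_pos ⟨rfl, hx⟩]
          ring
        · rw [getD_set_ne _ _ _ _ hk, if_neg (by tauto)]
          ring
      · rw [if_neg hx, ih _ _ hj, if_neg (by tauto)]
        ring

theorem getD_part1Outer (m : List String) (ds : List String) (r : List Int) (j : Nat)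
    (hj : j < r.length) :
    (part1Outer m ds r).getD j 0
      = r.getD j 0 + (ds.map (fun s => indCount 0 m j (PySem.Str.len s))).sum := by
  induction ds generalizing r with
  | nil => simp [part1Outer]
  | cons dstr rest ih =>
      simp only [part1Outer, List.map_cons, List.sum_cons]
      rw [ih _ (by rw [length_part1Inner]; exact hj), getD_part1Inner _ _ _ _ _ hj]
      ring

-- the 0/1-sum over digits at one fixed length is a count of that length
theorem sum_ind_eq_count (ds : List String) (L : Int) :
    (ds.map (fun s => if L = PySem.Str.len s then (1 : Int) else 0)).sum
      = (((ds.map PySem.Str.len).count L : Nat) : Int) := by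
  induction ds with
  | nil => simp
  | cons s rest ih =>
      simp only [List.map_cons, List.sum_cons, List.count_cons, ih]
      by_cases h : L = PySem.Str.len s
      · rw [if_pos h, if_pos (by exact (beq_iff_eq).mpr h.symm)]
        push_cast
        ring
      · rw [if_neg h]
        rw [if_neg (by simp only [beq_iff_eq]; exact fun e => h e.symm)]
        ring

theorem getD_countLens (ys : List String) (c : PySem.Dict Int Int) (L : Int) :
    (countLens ys c).getD L 0 = c.getD L 0 + (((ys.map PySem.Str.len).count L : Nat) : Int) := by
  induction ys generalizing c with
  | nil => simp [countLens]
  | cons y rest ih =>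
      simp only [countLens, List.map_cons, List.count_cons]
      rw [ih, PySem.Dict.getD_insert]
      by_cases h : L = PySem.Str.len y
      · rw [if_pos h, if_pos (by exact (beq_iff_eq).mpr h.symm), h]
        push_cast
        ring
      · rw [if_neg h, if_neg (by simp only [beq_iff_eq]; exact fun e => h e.symm)]
        push_cast
        ring

theorem getD_countAll (digits : List (List String)) (c : PySem.Dict Int Int) (L : Int) :
    (countAll digits c).getD L 0
      = c.getD L 0 + (((digits.flatten.map PySem.Str.len).count L : Nat) : Int) := by
  induction digits generalizing c with
  | nil => simp [countAll]
  | cons x rest ih =>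
      simp only [countAll, List.flatten_cons, List.map_append, List.count_append]
      rw [ih, getD_countLens]
      push_cast
      ring

-- one cons step of the per-index match sum
theorem sum_ind_cons (ds : List String) (x : String) (rest : List String) (k j : Nat) :
    (ds.map (fun s => indCount k (x :: rest) j (PySem.Str.len s))).sum
      = (if k = j then (((ds.map PySem.Str.len).count (PySem.Str.len x) : Nat) : Int) else 0)
        + (ds.map (fun s => indCount (k + 1) rest j (PySem.Str.len s))).sum := by
  have huf : (fun s => indCount k (x :: rest) j (PySem.Str.len s))
      = fun s => (if k = j ∧ PySem.Str.len x = PySem.Str.len s then (1 : Int) else 0)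
          + indCount (k + 1) rest j (PySem.Str.len s) := rfl
  rw [huf, PySem.List.sum_map_add_int]
  by_cases hk : k = j
  · rw [if_pos hk, ← sum_ind_eq_count ds (PySem.Str.len x)]
    have : (fun s => if k = j ∧ PySem.Str.len x = PySem.Str.len s then (1 : Int) else 0)
        = fun s => if PySem.Str.len x = PySem.Str.len s then (1 : Int) else 0 := by
      funext s
      by_cases hx : PySem.Str.len x = PySem.Str.len s
      · rw [if_pos ⟨hk, hx⟩, if_pos hx]
      · rw [if_neg (by tauto), if_neg hx]
    rw [this]
  · rw [if_neg hk]
    have : (fun s => if k = j ∧ PySem.Str.len x = PySem.Str.len s then (1 : Int) else 0)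
        = fun _ => (0 : Int) := by
      funext s
      rw [if_neg (by tauto)]
    rw [this]
    simp

-- master bridge: the four per-index match sums of A equal B's selective lookup pass
theorem master (ds : List String) (c : PySem.Dict Int Int)
    (hc : ∀ L, c.getD L 0 = (((ds.map PySem.Str.len).count L : Nat) : Int))
    (m : List String) (k : Nat) :
    (ds.map (fun s => indCount k m 1 (PySem.Str.len s))).sum
      + (ds.map (fun s => indCount k m 4 (PySem.Str.len s))).sum
      + (ds.map (fun s => indCount k m 7 (PySem.Str.len s))).sum
      + (ds.map (fun s => indCount k m 8 (PySem.Str.len s))).sum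
      = sumSel c k m := by
  induction m generalizing k with
  | nil => simp [indCount, sumSel]
  | cons x rest ih =>
      simp only [sumSel, sum_ind_cons]
      rw [← ih (k + 1), ← hc (PySem.Str.len x)]
      by_cases h1 : k = 1
      · rw [if_pos h1, if_neg (by omega), if_neg (by omega), if_neg (by omega),
            if_pos (by tauto)]
        ring
      · by_cases h4 : k = 4
        · rw [if_neg h1, if_pos h4, if_neg (by omega), if_neg (by omega),
              if_pos (by tauto)]
          ring
        · by_cases h7 : k = 7
          · rw [if_neg h1, if_neg h4, if_pos h7, if_neg (by omega), if_pos (by tauto)]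
            ring
          · by_cases h8 : k = 8
            · rw [if_neg h1, if_neg h4, if_neg h7, if_pos h8, if_pos (by tauto)]
              ring
            · rw [if_neg h1, if_neg h4, if_neg h7, if_neg h8, if_neg (by tauto)]
              ring

theorem r0_eq : (PySem.List.pyRange 0 10 1).map (fun _ => (0 : Int))
    = [0, 0, 0, 0, 0, 0, 0, 0, 0, 0] := by decide

-- ===== VERDICT (by name: the statement is the Claim_ definition above) =====
theorem part1_spec : Claim_equal_part1 := by
  intro m digits _ _
  unfold Spec_part1 part1 part1_alt
  rw [r0_eq]
  show (part1Outer m digits.flatten [0, 0, 0, 0, 0, 0, 0, 0, 0, 0]).getD 1 0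
      + (part1Outer m digits.flatten [0, 0, 0, 0, 0, 0, 0, 0, 0, 0]).getD 4 0
      + (part1Outer m digits.flatten [0, 0, 0, 0, 0, 0, 0, 0, 0, 0]).getD 7 0
      + (part1Outer m digits.flatten [0, 0, 0, 0, 0, 0, 0, 0, 0, 0]).getD 8 0
      = sumSel (countAll digits PySem.Dict.empty) 0 m
  have hl : ([0, 0, 0, 0, 0, 0, 0, 0, 0, 0] : List Int).length = 10 := by decide
  rw [getD_part1Outer _ _ _ 1 (by omega), getD_part1Outer _ _ _ 4 (by omega),
      getD_part1Outer _ _ _ 7 (by omega), getD_part1Outer _ _ _ 8 (by omega)]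
  have hc : ∀ L, (countAll digits PySem.Dict.empty).getD L 0
      = (((digits.flatten.map PySem.Str.len).count L : Nat) : Int) := by
    intro L
    rw [getD_countAll]
    simp
  rw [← master digits.flatten (countAll digits PySem.Dict.empty) hc m 0]
  have hz : ([0, 0, 0, 0, 0, 0, 0, 0, 0, 0] : List Int).getD 1 0 = 0 ∧
      ([0, 0, 0, 0, 0, 0, 0, 0, 0, 0] : List Int).getD 4 0 = 0 ∧
      ([0, 0, 0, 0, 0, 0, 0, 0, 0, 0] : List Int).getD 7 0 = 0 ∧
      ([0, 0, 0, 0, 0, 0, 0, 0, 0, 0] : List Int).getD 8 0 = 0 := by decide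
  rw [hz.1, hz.2.1, hz.2.2.1, hz.2.2.2]
  ring
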